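-- pv_equiv track=rewrite | github.com/Realizedd/baekjoon | 11660.py | generate_sum_matrix
-- ===== SOURCE A (Python) =====
-- def generate_sum_matrix(matrix, N):
--     row_sums = []
--     col_sum = [0] * N
--     total = 0
--
--     for r in range(N):
--         row_total = sum(matrix[r])
--         row_sum = [row_total]
--
--         for c in range(N):
--             if c > 0:
--                 row_sum.append(row_sum[-1] - matrix[r][c - 1])
--
--             col_sum[c] += matrix[r][c]
--             total += matrix[r][c]
--
--         row_sums.append(row_sum)
--
--     sum_matrix = [[0] * N for _ in range(N)]
--     row_exclude = [0] * N
--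
--     for r in range(N):
--         sum_matrix[r][0] = total - row_exclude[0]
--         row_exclude[0] += row_sums[r][0]
--
--         col_exclude = col_sum[0]
--
--         for c in range(1, N):
--             sum_matrix[r][c] = total - (row_exclude[c] + col_exclude)
--             row_exclude[c] += row_sums[r][c]
--             col_exclude += + col_sum[c]
--
--     return sum_matrix
-- ===== SOURCE B (Python) =====
-- def generate_sum_matrix(matrix, N):
--     below = [0] * N
--     rows = []
--     for r in range(N - 1, -1, -1):
--         cur = []
--         right = 0
--         for c in range(N - 1, -1, -1):
--             diag = below[c + 1] if c + 1 < N else 0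
--             val = matrix[r][c] + right + below[c] - diag
--             cur = [val] + cur
--             right = val
--         rows = [cur] + rows
--         below = cur
--     return rows
-- ===== Notes on version B (the rewrite author's own statement) =====
-- stated objective: simpler
-- what changed: Replaces A's row-suffix tables plus row-exclusion/column-exclusion accumulators with the standard bottom-up inclusion-exclusion DP S[r][c] = m[r][c] + S[r+1][c] + S[r][c+1] - S[r+1][c+1], building the rows functionally from the bottom row up.
-- intended difference: On inputs where some of the first N-1 rows has entries beyond column N with nonzero sum, A's full-row sums leak that out-of-block mass and every later row of its table is shifted by it (e.g. A gives [[10,6],[0,-3]] on ([[1,2,7],[3,4]],2)), while B returns the true N-by-N suffix sums [[10,6],[7,4]], the intended value. — e.g. on generate_sum_matrix([[1, 2, 7], [3, 4]], 2): A returns [[10, 6], [0, -3]], B returns [[10, 6], [7, 4]]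
import Mathlib
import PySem

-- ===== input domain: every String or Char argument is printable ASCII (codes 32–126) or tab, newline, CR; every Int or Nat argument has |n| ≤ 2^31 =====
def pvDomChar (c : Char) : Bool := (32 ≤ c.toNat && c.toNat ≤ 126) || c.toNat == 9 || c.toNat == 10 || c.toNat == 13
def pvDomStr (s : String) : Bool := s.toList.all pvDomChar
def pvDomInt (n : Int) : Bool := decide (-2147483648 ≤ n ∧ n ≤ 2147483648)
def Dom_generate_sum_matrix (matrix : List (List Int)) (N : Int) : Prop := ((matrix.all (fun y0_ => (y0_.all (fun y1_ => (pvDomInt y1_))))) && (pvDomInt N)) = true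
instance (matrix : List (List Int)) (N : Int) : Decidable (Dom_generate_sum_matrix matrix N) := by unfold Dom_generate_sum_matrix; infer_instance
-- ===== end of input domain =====

-- B replaces A's row-suffix tables and exclusion accumulators by the standard bottom-up
-- inclusion-exclusion DP for 2D suffix sums; same O(N^2) cost, shorter and plainer.


-- ===== PORT A =====
-- body of A's first inner loop (over c); state = (row_sum, col_sum, total)
def pvA1Step (row : List Int) (st2 : List Int × List Int × Int) (c : Int) : List Int × List Int × Int :=
  let row_sum := if c > 0 then st2.1 ++ [PySem.List.pyGetD st2.1 (-1) 0 - PySem.List.pyGetD row (c - 1) 0] else st2.1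
  let col_sum := PySem.List.pySetD st2.2.1 c (PySem.List.pyGetD st2.2.1 c 0 + PySem.List.pyGetD row c 0)
  (row_sum, col_sum, st2.2.2 + PySem.List.pyGetD row c 0)

-- body of A's first outer loop (over r); state = (row_sums, col_sum, total)
def pvA1Row (matrix : List (List Int)) (N : Int) (st : List (List Int) × List Int × Int) (r : Int) : List (List Int) × List Int × Int :=
  let row := PySem.List.pyGetD matrix r []
  let inner := (PySem.List.pyRange 0 N 1).foldl (pvA1Step row) ([row.sum], st.2.1, st.2.2)
  (st.1 ++ [inner.1], inner.2.1, inner.2.2)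

-- body of A's second inner loop (over c, from 1); state = (sum_matrix, row_exclude, col_exclude)
def pvA2Step (total : Int) (col_sum rs_r : List Int) (r : Int) (st2 : List (List Int) × List Int × Int) (c : Int) : List (List Int) × List Int × Int :=
  let sum_matrix := PySem.List.pySetD st2.1 r (PySem.List.pySetD (PySem.List.pyGetD st2.1 r []) c (total - (PySem.List.pyGetD st2.2.1 c 0 + st2.2.2)))
  let row_exclude := PySem.List.pySetD st2.2.1 c (PySem.List.pyGetD st2.2.1 c 0 + PySem.List.pyGetD rs_r c 0)
  (sum_matrix, row_exclude, st2.2.2 + PySem.List.pyGetD col_sum c 0)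

-- body of A's second outer loop (over r); state = (sum_matrix, row_exclude)
def pvA2Row (row_sums : List (List Int)) (col_sum : List Int) (total N : Int) (st : List (List Int) × List Int) (r : Int) : List (List Int) × List Int :=
  let rs_r := PySem.List.pyGetD row_sums r []
  let sum_matrix := PySem.List.pySetD st.1 r (PySem.List.pySetD (PySem.List.pyGetD st.1 r []) 0 (total - PySem.List.pyGetD st.2 0 0))
  let row_exclude := PySem.List.pySetD st.2 0 (PySem.List.pyGetD st.2 0 0 + PySem.List.pyGetD rs_r 0 0)
  let inner := (PySem.List.pyRange 1 N 1).foldl (pvA2Step total col_sum rs_r r) (sum_matrix, row_exclude, PySem.List.pyGetD col_sum 0 0)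
  (inner.1, inner.2.1)

def generate_sum_matrix (matrix : List (List Int)) (N : Int) : List (List Int) :=
  let phase1 := (PySem.List.pyRange 0 N 1).foldl (pvA1Row matrix N) ([], List.replicate N.toNat 0, 0)
  let phase2 := (PySem.List.pyRange 0 N 1).foldl (pvA2Row phase1.1 phase1.2.1 phase1.2.2 N)
    (List.replicate N.toNat (List.replicate N.toNat 0), List.replicate N.toNat 0)
  phase2.1

-- ===== PORT B =====
-- body of B's inner loop (over c, descending); state = (cur, right)
def pvBStep (matrix : List (List Int)) (N : Int) (below : List Int) (r : Int) (st2 : List Int × Int) (c : Int) : List Int × Int :=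
  let diag := if c + 1 < N then PySem.List.pyGetD below (c + 1) 0 else 0
  let val := PySem.List.pyGetD (PySem.List.pyGetD matrix r []) c 0 + st2.2 + PySem.List.pyGetD below c 0 - diag
  (st2.1 ++ [val], val)

-- body of B's outer loop (over r, descending); state = (below, rows)
def pvBRow (matrix : List (List Int)) (N : Int) (st : List Int × List (List Int)) (r : Int) : List Int × List (List Int) :=
  let inner := (PySem.List.pyRange (N - 1) (-1) (-1)).foldl (pvBStep matrix N st.1 r) ([], 0)
  let cur := inner.1.reverse
  (cur, st.2 ++ [cur])

def generate_sum_matrix_alt (matrix : List (List Int)) (N : Int) : List (List Int) :=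
  ((PySem.List.pyRange (N - 1) (-1) (-1)).foldl (pvBRow matrix N) (List.replicate N.toNat 0, [])).2.reverse

-- ===== PRECONDITION & SPEC =====
-- Pre_ excludes exactly the inputs where the Python A raises IndexError:
-- N exceeding the number of rows, or one of the first N rows shorter than N.
def Pre_generate_sum_matrix (matrix : List (List Int)) (N : Int) : Prop :=
  N ≤ (matrix.length : Int) ∧ ∀ row ∈ matrix.take N.toNat, N ≤ (row.length : Int)
instance (matrix : List (List Int)) (N : Int) : Decidable (Pre_generate_sum_matrix matrix N) := by
  unfold Pre_generate_sum_matrix; infer_instance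

def pvWitness_generate_sum_matrix : List (List Int) × Int := ([[1, 2], [3, 4]], 2)

-- On inputs where some of the first N-1 rows has entries beyond column N with nonzero sum, A's
-- full-row sums leak that out-of-block mass and shift every later row of its table by it, while
-- B returns the true N×N suffix sums, the intended value.
def D_generate_sum_matrix (matrix : List (List Int)) (N : Int) : Prop :=
  ∃ row ∈ matrix.take (N.toNat - 1), (row.drop N.toNat).sum ≠ 0
instance (matrix : List (List Int)) (N : Int) : Decidable (D_generate_sum_matrix matrix N) := by
  unfold D_generate_sum_matrix; infer_instance

def Spec_generate_sum_matrix (matrix : List (List Int)) (N : Int) (out : List (List Int)) : Prop :=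
  ¬ D_generate_sum_matrix matrix N → out = generate_sum_matrix_alt matrix N
instance (matrix : List (List Int)) (N : Int) (out : List (List Int)) : Decidable (Spec_generate_sum_matrix matrix N out) := by
  unfold Spec_generate_sum_matrix; infer_instance

def pvDiffWitness_generate_sum_matrix : List (List Int) × Int := ([[1, 2, 7], [3, 4]], 2)
def pvDiffWitnessOut_generate_sum_matrix : (List (List Int)) × (List (List Int)) :=
  ([[10, 6], [0, -3]], [[10, 6], [7, 4]])

-- ===== CLAIM (what is proved, stated in full; the proofs are below) =====
def Claim_unchanged_generate_sum_matrix : Prop := ∀ (matrix : List (List Int)) (N : Int), Dom_generate_sum_matrix matrix N → Pre_generate_sum_matrix matrix N → Spec_generate_sum_matrix matrix N (generate_sum_matrix matrix N)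
def Claim_changed_generate_sum_matrix : Prop := Dom_generate_sum_matrix (pvDiffWitness_generate_sum_matrix.1) (pvDiffWitness_generate_sum_matrix.2) ∧ Pre_generate_sum_matrix (pvDiffWitness_generate_sum_matrix.1) (pvDiffWitness_generate_sum_matrix.2) ∧ D_generate_sum_matrix (pvDiffWitness_generate_sum_matrix.1) (pvDiffWitness_generate_sum_matrix.2) ∧ generate_sum_matrix (pvDiffWitness_generate_sum_matrix.1) (pvDiffWitness_generate_sum_matrix.2) = pvDiffWitnessOut_generate_sum_matrix.1 ∧ generate_sum_matrix_alt (pvDiffWitness_generate_sum_matrix.1) (pvDiffWitness_generate_sum_matrix.2) = pvDiffWitnessOut_generate_sum_matrix.2 ∧ pvDiffWitnessOut_generate_sum_matrix.1 ≠ pvDiffWitnessOut_generate_sum_matrix.2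
def Claim_exact_generate_sum_matrix : Prop := ∀ (matrix : List (List Int)) (N : Int), Dom_generate_sum_matrix matrix N → Pre_generate_sum_matrix matrix N → D_generate_sum_matrix matrix N → generate_sum_matrix matrix N ≠ generate_sum_matrix_alt matrix N

-- ===== LEMMAS AND PROOFS =====

-- entry (i,j) of the matrix, 0 outside
def pvG (m : List (List Int)) (i j : Nat) : Int := (m.getD i []).getD j 0
-- sum of row i over columns [c, n)
def pvRowSuf (m : List (List Int)) (n i c : Nat) : Int := ∑ j ∈ Finset.Ico c n, pvG m i j
-- 2D suffix sum of the N×N block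
def pvSuf (m : List (List Int)) (n r c : Nat) : Int := ∑ i ∈ Finset.Ico r n, pvRowSuf m n i c
-- prefix sum of row i over columns [0, c)
def pvPre (m : List (List Int)) (i c : Nat) : Int := ∑ j ∈ Finset.range c, pvG m i j
-- full Python row sum
def pvFull (m : List (List Int)) (i : Nat) : Int := (m.getD i []).sum
-- A's row_sums entry
def pvRsA (m : List (List Int)) (i c : Nat) : Int := pvFull m i - pvPre m i c
-- column sum over rows [0, n)
def pvCol (m : List (List Int)) (n j : Nat) : Int := ∑ i ∈ Finset.range n, pvG m i j
-- A's total
def pvTot (m : List (List Int)) (n : Nat) : Int := ∑ i ∈ Finset.range n, pvPre m i n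
-- out-of-block mass of row i
def pvEx (m : List (List Int)) (n i : Nat) : Int := pvFull m i - pvPre m i n
def pvExSum (m : List (List Int)) (n r : Nat) : Int := ∑ i ∈ Finset.range r, pvEx m n i
-- A's cell formula
def pvF (m : List (List Int)) (n r c : Nat) : Int :=
  pvTot m n - ((∑ i ∈ Finset.range r, pvRsA m i c) + ∑ j ∈ Finset.range c, pvCol m n j)

-- generic map-over-range reading/writing helpers
theorem pv_getD_map_range {α : Type} (f : Nat → α) (n k : Nat) (d : α) :
    ((List.range n).map f).getD k d = if k < n then f k else d := by
  rw [List.getD_eq_getElem?_getD]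
  by_cases h : k < n
  · simp [h]
  · rw [List.getElem?_eq_none (by simpa using Nat.le_of_not_lt h)]
    simp [h]

theorem pv_pyGetD_map_range {α : Type} [Inhabited α] (f : Nat → α) (n k : Nat) (d : α) :
    PySem.List.pyGetD ((List.range n).map f) (k : Int) d = if k < n then f k else d := by
  rw [PySem.List.pyGetD_natCast]
  exact pv_getD_map_range f n k d

theorem pv_pySetD_map_range {α : Type} (f : Nat → α) (n k : Nat) (v : α) :
    PySem.List.pySetD ((List.range n).map f) (k : Int) v
      = (List.range n).map (fun j => if j = k then v else f j) := by
  rw [PySem.List.pySetD_natCast]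
  apply List.ext_getElem
  · simp
  · intro i h1 h2
    simp only [List.getElem_set, List.getElem_map, List.getElem_range]
    by_cases hik : k = i
    · simp [hik]
    · simp only [if_neg hik, if_neg (fun (h : i = k) => hik h.symm)]

theorem pv_map_range_congr {α : Type} (f g : Nat → α) (n : Nat) (h : ∀ j, j < n → f j = g j) :
    (List.range n).map f = (List.range n).map g := by
  exact List.map_congr_left (fun a ha => h a (List.mem_range.mp ha))

theorem pv_replicate_eq_map {α : Type} (n : Nat) (z : α) :
    List.replicate n z = (List.range n).map (fun _ => z) := by
  induction n with
  | zero => simp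
  | succ k ih => rw [List.range_succ, List.map_append, ← ih, List.replicate_succ']; simp

-- arithmetic facts
theorem pv_sum_getD_range (l : List Int) (n : Nat) :
    ∑ j ∈ Finset.range n, l.getD j 0 = (l.take n).sum := by
  induction n with
  | zero => simp
  | succ k ih =>
    rw [Finset.sum_range_succ, ih, List.take_add_one, List.sum_append]
    simp only [List.getD_eq_getElem?_getD]
    cases h : l[k]? <;> simp

theorem pvEx_eq_dropsum (m : List (List Int)) (n i : Nat) :
    pvEx m n i = ((m.getD i []).drop n).sum := by
  unfold pvEx pvFull pvPre pvG
  rw [pv_sum_getD_range]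
  have h := congrArg List.sum (List.take_append_drop n (m.getD i []))
  rw [List.sum_append] at h
  omega

theorem pvSuf_zero_of_le_r (m : List (List Int)) (n r c : Nat) (h : n ≤ r) : pvSuf m n r c = 0 := by
  unfold pvSuf
  have he : Finset.Ico r n = ∅ := Finset.Ico_eq_empty (by omega)
  simp [he]

theorem pv_pyGetD_replicate_zero (n c : Nat) :
    PySem.List.pyGetD (List.replicate n (0 : Int)) (c : Int) 0 = 0 := by
  rw [pv_replicate_eq_map, pv_pyGetD_map_range]
  split <;> rfl

theorem pvSuf_zero_of_le (m : List (List Int)) (n r c : Nat) (h : n ≤ c) : pvSuf m n r c = 0 := by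
  unfold pvSuf pvRowSuf
  have he : Finset.Ico c n = ∅ := Finset.Ico_eq_empty (by omega)
  simp [he]

theorem pvSuf_rec (m : List (List Int)) (n r c : Nat) (hr : r < n) (hc : c < n) :
    pvSuf m n r c
      = pvG m r c + pvSuf m n r (c + 1) + pvSuf m n (r + 1) c - pvSuf m n (r + 1) (c + 1) := by
  have hrowrec : ∀ i, pvRowSuf m n i c = pvG m i c + pvRowSuf m n i (c + 1) := by
    intro i; unfold pvRowSuf pvG; exact Finset.sum_eq_sum_Ico_succ_bot hc _
  have h1 : pvSuf m n r c = pvRowSuf m n r c + pvSuf m n (r + 1) c := by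
    unfold pvSuf; exact Finset.sum_eq_sum_Ico_succ_bot hr _
  have h2 : pvSuf m n r (c + 1) = pvRowSuf m n r (c + 1) + pvSuf m n (r + 1) (c + 1) := by
    unfold pvSuf; exact Finset.sum_eq_sum_Ico_succ_bot hr _
  have h3 : pvSuf m n (r + 1) c = ∑ i ∈ Finset.Ico (r + 1) n, (pvG m i c + pvRowSuf m n i (c + 1)) := by
    unfold pvSuf; exact Finset.sum_congr rfl (fun i _ => hrowrec i)
  have h4 : pvSuf m n (r + 1) (c + 1) = ∑ i ∈ Finset.Ico (r + 1) n, pvRowSuf m n i (c + 1) := rfl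
  rw [h1, h2, hrowrec r, h3, h4, Finset.sum_add_distrib]
  ring

theorem pvF_eq (m : List (List Int)) (n r c : Nat) (hr : r ≤ n) (hc : c ≤ n) :
    pvF m n r c = pvSuf m n r c - pvExSum m n r := by
  have hrow : ∀ i, pvPre m i n - pvPre m i c = pvRowSuf m n i c := by
    intro i; unfold pvRowSuf pvPre pvG; rw [Finset.sum_Ico_eq_sub _ hc]
  have hsuf : pvSuf m n r c = (∑ i ∈ Finset.range n, pvRowSuf m n i c) - ∑ i ∈ Finset.range r, pvRowSuf m n i c := by
    unfold pvSuf; rw [Finset.sum_Ico_eq_sub _ hr]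
  have hcol : ∑ j ∈ Finset.range c, pvCol m n j = ∑ i ∈ Finset.range n, pvPre m i c := by
    unfold pvCol pvPre; rw [Finset.sum_comm]
  unfold pvF pvTot pvExSum pvRsA pvEx
  rw [hsuf, hcol]
  simp only [← hrow]
  simp only [Finset.sum_sub_distrib]
  ring

-- ===== B characterization =====
theorem pvB_inner (m : List (List Int)) (N : Int) (n : Nat) (hn : N = (n : Int)) (r : Nat)
    (hr : r < n) (below : List Int)
    (hb : ∀ c : Nat, PySem.List.pyGetD below (c : Int) 0 = pvSuf m n (r + 1) c) :
    ∀ j k : Nat, k + j = n →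
      (PySem.List.pyRange (k : Int) N 1).foldr (fun c st2 => pvBStep m N below (r : Int) st2 c) ([], 0)
        = (((List.range' k j).map (fun c => pvSuf m n r c)).reverse, pvSuf m n r k) := by
  intro j
  induction j with
  | zero =>
    intro k hk
    rw [PySem.List.pyRange_one_eq_nil (by rw [hn]; exact_mod_cast (by omega : n ≤ k))]
    simp [pvSuf_zero_of_le m n r k (by omega)]
  | succ j ih =>
    intro k hk
    have hkn : k < n := by omega
    have hcast : (k : Int) + 1 = ((k + 1 : Nat) : Int) := by push_cast; ring
    have hdiag : (if ((k + 1 : Nat) : Int) < N then PySem.List.pyGetD below ((k + 1 : Nat) : Int) 0 else 0)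
        = pvSuf m n (r + 1) (k + 1) := by
      by_cases h2 : k + 1 < n
      · rw [if_pos (by rw [hn]; exact_mod_cast h2), hb (k + 1)]
      · rw [if_neg (by rw [hn]; push_cast; omega), pvSuf_zero_of_le m n (r + 1) (k + 1) (by omega)]
    have hval : PySem.List.pyGetD (PySem.List.pyGetD m (r : Int) []) (k : Int) 0
          + pvSuf m n r (k + 1) + pvSuf m n (r + 1) k - pvSuf m n (r + 1) (k + 1)
        = pvSuf m n r k := by
      rw [pvSuf_rec m n r k hr hkn]; simp [pvG]
    rw [PySem.List.pyRange_one_cons (show (k : Int) < N by rw [hn]; exact_mod_cast hkn),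
      List.foldr_cons, hcast, ih (k + 1) (by omega)]
    unfold pvBStep
    simp only [hb k]
    rw [hcast, hdiag, hval, List.range'_succ, List.map_cons, List.reverse_cons]

theorem pvB_outer (m : List (List Int)) (N : Int) (n : Nat) (hn : N = (n : Int)) :
    ∀ j k : Nat, k + j = n →
      ((PySem.List.pyRange (k : Int) N 1).foldr (fun r st => pvBRow m N st r)
          (List.replicate n 0, [])).2
        = ((List.range' k j).map (fun r => (List.range n).map (fun c => pvSuf m n r c))).reverse
      ∧ ∀ c : Nat,
          PySem.List.pyGetD
            ((PySem.List.pyRange (k : Int) N 1).foldr (fun r st => pvBRow m N st r)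
              (List.replicate n 0, [])).1 (c : Int) 0 = pvSuf m n k c := by
  have hrev : PySem.List.pyRange (N - 1) (-1) (-1) = (PySem.List.pyRange 0 N 1).reverse := by
    rw [PySem.List.pyRange_neg_one_eq_reverse]; norm_num
  intro j
  induction j with
  | zero =>
    intro k hk
    rw [PySem.List.pyRange_one_eq_nil (by rw [hn]; exact_mod_cast (by omega : n ≤ k))]
    refine ⟨by simp, ?_⟩
    intro c
    rw [List.foldr_nil, pvSuf_zero_of_le_r m n k c (by omega)]
    exact pv_pyGetD_replicate_zero n c
  | succ j ih =>
    intro k hk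
    have hkn : k < n := by omega
    have hcast : (k : Int) + 1 = ((k + 1 : Nat) : Int) := by push_cast; ring
    rw [PySem.List.pyRange_one_cons (show (k : Int) < N by rw [hn]; exact_mod_cast hkn),
      List.foldr_cons, hcast]
    set ST := List.foldr (fun r st => pvBRow m N st r) (List.replicate n 0, [])
      (PySem.List.pyRange ((k + 1 : Nat) : Int) N 1) with hST
    obtain ⟨ih2, ih1⟩ := ih (k + 1) (by omega)
    have hinner := pvB_inner m N n hn k hkn ST.1 ih1 n 0 (by omega)
    simp only [Nat.cast_zero] at hinner
    simp only [pvBRow]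
    rw [hrev, List.foldl_reverse, hinner]
    simp only [List.reverse_reverse]
    refine ⟨?_, ?_⟩
    · rw [ih2, ← List.range_eq_range', List.range'_succ, List.map_cons, List.reverse_cons]
    · intro c
      rw [← List.range_eq_range', pv_pyGetD_map_range]
      split
      · rfl
      · exact (pvSuf_zero_of_le m n k c (by omega)).symm

theorem pvB_eq (m : List (List Int)) (N : Int) (n : Nat) (hn : N = (n : Int)) :
    generate_sum_matrix_alt m N
      = (List.range n).map (fun r => (List.range n).map (fun c => pvSuf m n r c)) := by
  have hrev : PySem.List.pyRange (N - 1) (-1) (-1) = (PySem.List.pyRange 0 N 1).reverse := by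
    rw [PySem.List.pyRange_neg_one_eq_reverse]; norm_num
  obtain ⟨h2, _⟩ := pvB_outer m N n hn n 0 (by omega)
  simp only [Nat.cast_zero] at h2
  unfold generate_sum_matrix_alt
  rw [show N.toNat = n by rw [hn]; exact Int.toNat_natCast n, hrev, List.foldl_reverse, h2,
    List.reverse_reverse, ← List.range_eq_range']

theorem pvB_neg (m : List (List Int)) (N : Int) (h : N < 0) : generate_sum_matrix_alt m N = [] := by
  unfold generate_sum_matrix_alt
  rw [PySem.List.pyRange_neg_one_eq_nil (by omega : N - 1 ≤ -1)]
  simp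

-- ===== A characterization =====
theorem pv_getLast_map_range (f : Nat → Int) (k : Nat) (h : (List.range k).map f ≠ []) :
    ((List.range k).map f).getLast h = f (k - 1) := by
  rw [List.getLast_eq_getElem]; simp

theorem pv_get0 {α : Type} [Inhabited α] (f : Nat → α) (n : Nat) (d : α) :
    PySem.List.pyGetD ((List.range n).map f) (0 : Int) d = if 0 < n then f 0 else d := by
  simpa using pv_pyGetD_map_range f n 0 d

theorem pv_set0 {α : Type} (f : Nat → α) (n : Nat) (v : α) :
    PySem.List.pySetD ((List.range n).map f) (0 : Int) v
      = (List.range n).map (fun j => if j = 0 then v else f j) := by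
  simpa using pv_pySetD_map_range f n 0 v

theorem pvRsA_step (m : List (List Int)) (r j : Nat) :
    pvRsA m r j - pvG m r j = pvRsA m r (j + 1) := by
  unfold pvRsA pvPre
  rw [Finset.sum_range_succ]
  ring

theorem pvA1_inner (m : List (List Int)) (N : Int) (n : Nat) (_hn : N = (n : Int)) (r : Nat)
    (h : Nat → Int) (t0 : Int) :
    ∀ k : Nat, 1 ≤ k → k ≤ n →
      (PySem.List.pyRange 0 (k : Int) 1).foldl (pvA1Step (m.getD r []))
          ([pvFull m r], (List.range n).map h, t0)
        = ((List.range k).map (pvRsA m r),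
           (List.range n).map (fun j => h j + if j < k then pvG m r j else 0),
           t0 + pvPre m r k) := by
  intro k hk1
  induction k, hk1 using Nat.le_induction with
  | base =>
    intro hn1
    have hr01 : PySem.List.pyRange 0 ((1 : Nat) : Int) 1 = [0] := by
      rw [show ((1 : Nat) : Int) = 0 + 1 by norm_num, PySem.List.pyRange_one_succ_right le_rfl,
        PySem.List.pyRange_one_eq_nil le_rfl]
      rfl
    rw [hr01, List.foldl_cons, List.foldl_nil]
    unfold pvA1Step
    simp only [pv_get0, pv_set0, if_pos (show 0 < n from hn1)]
    rw [PySem.List.pyGetD_zero]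
    refine Prod.ext ?_ (Prod.ext ?_ ?_)
    · show [pvFull m r] = _
      simp [List.range_one, pvRsA, pvPre]
    · show (List.range n).map _ = _
      refine pv_map_range_congr _ _ n (fun j hj => ?_)
      by_cases hj0 : j = 0
      · subst hj0; simp [pvG]
      · simp [hj0]
    · show t0 + (m.getD r []).getD 0 0 = t0 + pvPre m r 1
      simp [pvPre, pvG]
  | succ k hk1 ih =>
    intro hk2
    have hcast : ((k + 1 : Nat) : Int) = (k : Int) + 1 := by push_cast; ring
    rw [hcast, PySem.List.pyRange_one_succ_right (by positivity), List.foldl_append,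
      ih (by omega), List.foldl_cons, List.foldl_nil]
    unfold pvA1Step
    have hne : (List.range k).map (pvRsA m r) ≠ [] := by
      simp [List.map_eq_nil_iff, List.range_eq_nil]; omega
    have hlast : PySem.List.pyGetD ((List.range k).map (pvRsA m r)) (-1) 0 = pvRsA m r (k - 1) := by
      rw [PySem.List.pyGetD_neg_one _ _ hne, pv_getLast_map_range]
    have hcast2 : (k : Int) - 1 = ((k - 1 : Nat) : Int) := by omega
    have hrd : PySem.List.pyGetD (m.getD r []) ((k : Int) - 1) 0 = pvG m r (k - 1) := by
      rw [hcast2, PySem.List.pyGetD_natCast]; rfl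
    have hrdk : PySem.List.pyGetD (m.getD r []) (k : Int) 0 = pvG m r k := by
      rw [PySem.List.pyGetD_natCast]; rfl
    simp only [hlast, hrd, hrdk, if_pos (show (0 : Int) < (k : Int) by exact_mod_cast hk1),
      pv_pyGetD_map_range, pv_pySetD_map_range, if_pos (show k < n by omega)]
    refine Prod.ext ?_ (Prod.ext ?_ ?_)
    · show (List.range k).map (pvRsA m r) ++ [_] = _
      rw [pvRsA_step m r (k - 1), show k - 1 + 1 = k by omega, List.range_succ, List.map_append]
      rfl
    · show (List.range n).map _ = _
      refine pv_map_range_congr _ _ n (fun j hj => ?_)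
      by_cases hjk : j = k
      · subst hjk; simp
      · simp only [if_neg hjk]
        by_cases hjk2 : j < k
        · rw [if_pos hjk2, if_pos (by omega : j < k + 1)]
        · rw [if_neg hjk2, if_neg (by omega : ¬ j < k + 1)]
    · show t0 + pvPre m r k + pvG m r k = t0 + pvPre m r (k + 1)
      unfold pvPre pvG
      rw [Finset.sum_range_succ]
      ring

theorem pvA1_outer (m : List (List Int)) (N : Int) (n : Nat) (hn : N = (n : Int)) :
    ∀ k : Nat, k ≤ n →
      (PySem.List.pyRange 0 (k : Int) 1).foldl (pvA1Row m N) ([], List.replicate n 0, 0)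
        = ((List.range k).map (fun i => (List.range n).map (pvRsA m i)),
           (List.range n).map (fun j => ∑ i ∈ Finset.range k, pvG m i j),
           ∑ i ∈ Finset.range k, pvPre m i n) := by
  intro k
  induction k with
  | zero =>
    intro _
    rw [Nat.cast_zero, PySem.List.pyRange_one_eq_nil le_rfl, List.foldl_nil]
    refine Prod.ext (by simp) (Prod.ext ?_ (by simp))
    show List.replicate n 0 = _
    rw [pv_replicate_eq_map]
    exact pv_map_range_congr _ _ n (fun j _ => by simp)
  | succ k ih =>
    intro hk2
    have hkn : k < n := by omega
    have hcast : ((k + 1 : Nat) : Int) = (k : Int) + 1 := by push_cast; ring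
    rw [hcast, PySem.List.pyRange_one_succ_right (by positivity), List.foldl_append,
      ih (by omega), List.foldl_cons, List.foldl_nil]
    simp only [pvA1Row]
    rw [PySem.List.pyGetD_natCast,
      show (m.getD k []).sum = pvFull m k from rfl, hn,
      pvA1_inner m ((n : Nat) : Int) n rfl k (fun j => ∑ i ∈ Finset.range k, pvG m i j)
        (∑ i ∈ Finset.range k, pvPre m i n) n (by omega) le_rfl]
    refine Prod.ext ?_ (Prod.ext ?_ ?_)
    · show _ ++ [_] = _
      rw [List.range_succ, List.map_append]
      simp
    · show (List.range n).map _ = _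
      refine pv_map_range_congr _ _ n (fun j hj => ?_)
      rw [if_pos hj, Finset.sum_range_succ]
    · show _ + _ = _
      rw [Finset.sum_range_succ]

-- partially filled sum_matrix / row_exclude during A's second pass
def pvSM (m : List (List Int)) (n r c : Nat) : List (List Int) :=
  (List.range n).map (fun i => (List.range n).map (fun j =>
    if i < r ∨ (i = r ∧ j < c) then pvF m n i j else 0))
def pvRX (m : List (List Int)) (n r c : Nat) : List Int :=
  (List.range n).map (fun j => (∑ i ∈ Finset.range r, pvRsA m i j) + if j < c then pvRsA m r j else 0)

theorem pvA2_inner (m : List (List Int)) (N : Int) (n : Nat) (_hn : N = (n : Int)) (r : Nat)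
    (hr : r < n) :
    ∀ k : Nat, 1 ≤ k → k ≤ n →
      (PySem.List.pyRange 1 (k : Int) 1).foldl
          (pvA2Step (pvTot m n) ((List.range n).map (pvCol m n)) ((List.range n).map (pvRsA m r)) (r : Int))
          (pvSM m n r 1, pvRX m n r 1, pvCol m n 0)
        = (pvSM m n r k, pvRX m n r k, ∑ j ∈ Finset.range k, pvCol m n j) := by
  intro k hk1
  induction k, hk1 using Nat.le_induction with
  | base =>
    intro _
    rw [Nat.cast_one, PySem.List.pyRange_one_eq_nil le_rfl, List.foldl_nil]
    refine Prod.ext rfl (Prod.ext rfl ?_)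
    simp
  | succ k hk1 ih =>
    intro hk2
    have hkn : k < n := by omega
    have hcast : ((k + 1 : Nat) : Int) = (k : Int) + 1 := by push_cast; ring
    rw [hcast, PySem.List.pyRange_one_succ_right (by exact_mod_cast hk1), List.foldl_append,
      ih (by omega), List.foldl_cons, List.foldl_nil]
    unfold pvA2Step pvSM pvRX
    have hRXread : PySem.List.pyGetD ((List.range n).map (fun j =>
        (∑ i ∈ Finset.range r, pvRsA m i j) + if j < k then pvRsA m r j else 0)) (k : Int) 0
        = ∑ i ∈ Finset.range r, pvRsA m i k := by
      rw [pv_pyGetD_map_range]; simp [hkn]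
    have hSMread : PySem.List.pyGetD ((List.range n).map (fun i => (List.range n).map (fun j =>
        if i < r ∨ (i = r ∧ j < k) then pvF m n i j else 0))) (r : Int) []
        = (List.range n).map (fun j => if r < r ∨ (r = r ∧ j < k) then pvF m n r j else 0) := by
      rw [pv_pyGetD_map_range]; simp [hr]
    have hRSread : PySem.List.pyGetD ((List.range n).map (pvRsA m r)) (k : Int) 0 = pvRsA m r k := by
      rw [pv_pyGetD_map_range]; simp [hkn]
    have hCOLread : PySem.List.pyGetD ((List.range n).map (pvCol m n)) (k : Int) 0 = pvCol m n k := by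
      rw [pv_pyGetD_map_range]; simp [hkn]
    simp only [hRXread, hSMread, hRSread, hCOLread, pv_pySetD_map_range]
    refine Prod.ext ?_ (Prod.ext ?_ ?_)
    · show (List.range n).map _ = (List.range n).map _
      refine pv_map_range_congr _ _ n (fun i hi => ?_)
      by_cases hir : i = r
      · subst hir
        simp only [lt_irrefl, false_or, true_and]
        refine pv_map_range_congr _ _ n (fun j hj => ?_)
        by_cases hjk : j = k
        · subst hjk
          rw [if_pos rfl, if_pos (Nat.lt_succ_self _)]
          rfl
        · rw [if_neg hjk]
          split_ifs <;> first | rfl | omega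
      · simp only [if_neg hir]
        refine pv_map_range_congr _ _ n (fun j hj => ?_)
        split_ifs <;> first | rfl | omega
    · show (List.range n).map _ = (List.range n).map _
      refine pv_map_range_congr _ _ n (fun j hj => ?_)
      by_cases hjk : j = k
      · subst hjk
        rw [if_pos rfl, if_pos (Nat.lt_succ_self _)]
      · rw [if_neg hjk]
        split_ifs <;> first | rfl | omega
    · show _ + _ = _
      rw [Finset.sum_range_succ]

theorem pvA2_outer (m : List (List Int)) (N : Int) (n : Nat) (hn : N = (n : Int)) :
    ∀ k : Nat, k ≤ n →
      (PySem.List.pyRange 0 (k : Int) 1).foldl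
          (pvA2Row ((List.range n).map (fun i => (List.range n).map (pvRsA m i)))
            ((List.range n).map (pvCol m n)) (pvTot m n) N)
          (List.replicate n (List.replicate n 0), List.replicate n 0)
        = ((List.range n).map (fun i => (List.range n).map (fun j =>
              if i < k then pvF m n i j else 0)),
           (List.range n).map (fun j => ∑ i ∈ Finset.range k, pvRsA m i j)) := by
  intro k
  induction k with
  | zero =>
    intro _
    rw [Nat.cast_zero, PySem.List.pyRange_one_eq_nil le_rfl, List.foldl_nil]
    refine Prod.ext ?_ ?_
    · show List.replicate n (List.replicate n 0) = _
      rw [pv_replicate_eq_map]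
      refine pv_map_range_congr _ _ n (fun i hi => ?_)
      rw [pv_replicate_eq_map]
      exact pv_map_range_congr _ _ n (fun j hj => by simp)
    · show List.replicate n 0 = _
      rw [pv_replicate_eq_map]
      exact pv_map_range_congr _ _ n (fun j hj => by simp)
  | succ k ih =>
    intro hk2
    have hkn : k < n := by omega
    have hn1 : 0 < n := by omega
    have hcast : ((k + 1 : Nat) : Int) = (k : Int) + 1 := by push_cast; ring
    rw [hcast, PySem.List.pyRange_one_succ_right (by positivity), List.foldl_append,
      ih (by omega), List.foldl_cons, List.foldl_nil]
    simp only [pvA2Row]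
    rw [hn]
    have hRS : PySem.List.pyGetD ((List.range n).map (fun i => (List.range n).map (pvRsA m i)))
        (k : Int) [] = (List.range n).map (pvRsA m k) := by
      rw [pv_pyGetD_map_range]; simp [hkn]
    have hRX0 : PySem.List.pyGetD ((List.range n).map (fun j => ∑ i ∈ Finset.range k, pvRsA m i j))
        (0 : Int) 0 = ∑ i ∈ Finset.range k, pvRsA m i 0 := by
      rw [pv_get0, if_pos hn1]
    have hSMk : PySem.List.pyGetD ((List.range n).map (fun i => (List.range n).map (fun j =>
        if i < k then pvF m n i j else 0))) (k : Int) []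
        = (List.range n).map (fun _ => (0 : Int)) := by
      rw [pv_pyGetD_map_range]; simp [hkn]
    have hCOL0 : PySem.List.pyGetD ((List.range n).map (pvCol m n)) (0 : Int) 0 = pvCol m n 0 := by
      rw [pv_get0, if_pos hn1]
    have hRS0 : PySem.List.pyGetD ((List.range n).map (pvRsA m k)) (0 : Int) 0 = pvRsA m k 0 := by
      rw [pv_get0, if_pos hn1]
    simp only [hRS, hRX0, hSMk, hCOL0, hRS0, pv_set0, pv_pySetD_map_range]
    have hSM1 : (List.range n).map (fun i => if i = k then
          (List.range n).map (fun j => if j = 0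
            then pvTot m n - ∑ i ∈ Finset.range k, pvRsA m i 0 else (0 : Int))
          else (List.range n).map (fun j => if i < k then pvF m n i j else 0))
        = pvSM m n k 1 := by
      unfold pvSM
      refine pv_map_range_congr _ _ n (fun i hi => ?_)
      by_cases hik : i = k
      · subst hik
        rw [if_pos rfl]
        refine pv_map_range_congr _ _ n (fun j hj => ?_)
        by_cases hj0 : j = 0
        · subst hj0
          rw [if_pos rfl, if_pos (Or.inr ⟨rfl, by omega⟩)]
          simp [pvF]
        · rw [if_neg hj0, if_neg (by omega : ¬ (i < i ∨ (i = i ∧ j < 1)))]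
      · rw [if_neg hik]
        refine pv_map_range_congr _ _ n (fun j hj => ?_)
        split_ifs <;> first | rfl | omega
    have hRX1 : (List.range n).map (fun j => if j = 0
          then (∑ i ∈ Finset.range k, pvRsA m i 0) + pvRsA m k 0
          else ∑ i ∈ Finset.range k, pvRsA m i j)
        = pvRX m n k 1 := by
      unfold pvRX
      refine pv_map_range_congr _ _ n (fun j hj => ?_)
      by_cases hj0 : j = 0
      · subst hj0
        rw [if_pos rfl, if_pos (by omega : (0 : Nat) < 1)]
      · rw [if_neg hj0, if_neg (by omega : ¬ j < 1), add_zero]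
    rw [hSM1, hRX1, pvA2_inner m ((n : Nat) : Int) n rfl k hkn n (by omega) le_rfl]
    refine Prod.ext ?_ ?_
    · show pvSM m n k n = _
      unfold pvSM
      refine pv_map_range_congr _ _ n (fun i hi => ?_)
      refine pv_map_range_congr _ _ n (fun j hj => ?_)
      split_ifs <;> first | rfl | omega
    · show pvRX m n k n = _
      unfold pvRX
      refine pv_map_range_congr _ _ n (fun j hj => ?_)
      rw [if_pos hj]
      exact (Finset.sum_range_succ _ _).symm

theorem pvA_eq (m : List (List Int)) (N : Int) (n : Nat) (hn : N = (n : Int)) :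
    generate_sum_matrix m N
      = (List.range n).map (fun r => (List.range n).map (fun c => pvF m n r c)) := by
  simp only [generate_sum_matrix]
  rw [hn, Int.toNat_natCast,
    pvA1_outer m ((n : Nat) : Int) n rfl n le_rfl,
    show (fun j => ∑ i ∈ Finset.range n, pvG m i j) = pvCol m n from rfl,
    show (∑ i ∈ Finset.range n, pvPre m i n) = pvTot m n from rfl,
    pvA2_outer m ((n : Nat) : Int) n rfl n le_rfl]
  refine pv_map_range_congr _ _ n (fun r hr => ?_)
  refine pv_map_range_congr _ _ n (fun c hc => ?_)
  rw [if_pos hr]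

theorem pvA_neg (m : List (List Int)) (N : Int) (h : N < 0) : generate_sum_matrix m N = [] := by
  simp [generate_sum_matrix, PySem.List.pyRange_one_eq_nil (by omega : N ≤ 0),
    Int.toNat_of_nonpos (by omega : N ≤ 0)]

-- extras vanish outside D_
theorem pvEx_zero_of_notD (m : List (List Int)) (N : Int) (n : Nat) (hn : N = (n : Int))
    (hD : ¬ D_generate_sum_matrix m N) : ∀ i : Nat, i < n - 1 → pvEx m n i = 0 := by
  intro i hi
  unfold D_generate_sum_matrix at hD
  push Not at hD
  rw [pvEx_eq_dropsum]
  by_cases hlen : i < m.length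
  · have hgd : m.getD i [] = m[i] := by
      rw [List.getD_eq_getElem?_getD, List.getElem?_eq_getElem hlen]
      rfl
    have htn : N.toNat = n := by omega
    have hmem : m[i] ∈ m.take (N.toNat - 1) := by
      have hit : i < (m.take (N.toNat - 1)).length := by
        simp [List.length_take]; omega
      have := List.getElem_take (xs := m) (i := i) (h := hit)
      rw [← this]
      exact List.getElem_mem hit
    rw [hgd, ← htn]
    exact hD _ hmem
  · rw [List.getD_eq_default _ _ (by omega)]
    simp

-- ===== VERDICT (by name: the statement is the Claim_ definition above) =====
theorem generate_sum_matrix_spec : Claim_unchanged_generate_sum_matrix := by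
  unfold Claim_unchanged_generate_sum_matrix
  intro matrix N _ _
  unfold Spec_generate_sum_matrix
  intro hD
  by_cases hN : 0 ≤ N
  · obtain ⟨n, hn⟩ : ∃ n : Nat, N = (n : Int) := ⟨N.toNat, (Int.toNat_of_nonneg hN).symm⟩
    rw [pvA_eq matrix N n hn, pvB_eq matrix N n hn]
    refine pv_map_range_congr _ _ n (fun r hr => ?_)
    refine pv_map_range_congr _ _ n (fun c hc => ?_)
    rw [pvF_eq matrix n r c (by omega) (by omega)]
    have hz : pvExSum matrix n r = 0 := by
      unfold pvExSum
      refine Finset.sum_eq_zero (fun i hi => ?_)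
      exact pvEx_zero_of_notD matrix N n hn hD i
        (by have := Finset.mem_range.mp hi; omega)
    rw [hz, sub_zero]
  · rw [pvA_neg matrix N (by omega), pvB_neg matrix N (by omega)]

theorem generate_sum_matrix_changed : Claim_changed_generate_sum_matrix := by
  unfold Claim_changed_generate_sum_matrix; decide

theorem generate_sum_matrix_tight : Claim_exact_generate_sum_matrix := by
  unfold Claim_exact_generate_sum_matrix
  intro matrix N _ _ hD heq
  obtain ⟨row, hmem, hsum⟩ := hD
  have hN0 : 0 ≤ N := by
    by_contra h
    have h0 : N.toNat = 0 := by omega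
    rw [h0] at hmem
    simp at hmem
  set n := N.toNat with hnn
  have hn : N = (n : Int) := by omega
  obtain ⟨t, ht, hrow⟩ := List.getElem_of_mem hmem
  have ht1 : t < n - 1 := by
    have := ht; simp [List.length_take] at this; omega
  have ht2 : t < matrix.length := by
    have := ht; simp [List.length_take] at this; omega
  have hgd : matrix.getD t [] = row := by
    rw [List.getD_eq_getElem?_getD, List.getElem?_eq_getElem ht2]
    rw [← hrow, List.getElem_take]
    rfl
  have hEx_t : pvEx matrix n t ≠ 0 := by
    rw [pvEx_eq_dropsum, hgd]
    exact hsum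
  have hex : ∃ i, pvEx matrix n i ≠ 0 := ⟨t, hEx_t⟩
  have hi0 : pvEx matrix n (Nat.find hex) ≠ 0 := Nat.find_spec hex
  have hmin : ∀ i < Nat.find hex, pvEx matrix n i = 0 :=
    fun i hi => not_not.mp (Nat.find_min hex hi)
  have hi0t : Nat.find hex ≤ t := Nat.find_min' hex hEx_t
  have hi0n : Nat.find hex + 1 < n := by omega
  rw [pvA_eq matrix N n hn, pvB_eq matrix N n hn] at heq
  have hcell := congrArg (fun l => (l.getD (Nat.find hex + 1) []).getD 0 0) heq
  simp only [pv_getD_map_range, if_pos hi0n, if_pos (show 0 < n by omega)] at hcell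
  rw [pvF_eq matrix n _ 0 (by omega) (by omega)] at hcell
  have hsum0 : pvExSum matrix n (Nat.find hex + 1) = pvEx matrix n (Nat.find hex) := by
    unfold pvExSum
    rw [Finset.sum_range_succ,
      Finset.sum_eq_zero (fun i hi => hmin i (Finset.mem_range.mp hi)), zero_add]
  rw [hsum0] at hcell
  omega
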